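-- pv_equiv track=rewrite | github.com/abominablem/polygon | antioch/ofx_parser.py | parse_payment_type
-- ===== SOURCE A (Python) =====
-- def parse_payment_type(text):
--     """ These may not be generic """
--     types = [")))", "ATM", "BP", "CR", "DD", "SO", "TFR", "VIS", "DR"]
--     for ptype in types:
--         if text[(-1*len(ptype)-1):] == " %s" % ptype:
--             return ptype, text[:(-1*len(ptype)-1)]
--         elif text == ptype:
--             return ptype, ""
--     return (None, text)
-- ===== SOURCE B (Python) =====
-- def parse_payment_type(text):
--     types = {")))", "ATM", "BP", "CR", "DD", "SO", "TFR", "VIS", "DR"}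
--     prefix, sep, last = text.rpartition(" ")
--     if sep and last in types:
--         return last, prefix
--     if text in types:
--         return text, ""
--     return None, text
-- ===== Notes on version B (the rewrite author's own statement) =====
-- stated objective: simpler
-- what changed: B extracts the trailing space-delimited token once with rpartition and looks it up in a set of type codes, instead of A's loop testing a suffix slice of text against each of the 9 codes.
import Mathlib
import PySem

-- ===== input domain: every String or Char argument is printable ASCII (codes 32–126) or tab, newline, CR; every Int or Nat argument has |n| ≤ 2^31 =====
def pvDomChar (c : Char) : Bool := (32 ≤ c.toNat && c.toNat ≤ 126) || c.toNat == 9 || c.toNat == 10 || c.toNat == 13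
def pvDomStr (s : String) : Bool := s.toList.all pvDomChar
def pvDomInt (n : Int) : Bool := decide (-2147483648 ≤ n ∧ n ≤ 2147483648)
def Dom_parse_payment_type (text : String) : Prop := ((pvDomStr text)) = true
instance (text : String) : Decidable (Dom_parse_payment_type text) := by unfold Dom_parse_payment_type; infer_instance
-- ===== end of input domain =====

-- B replaces A's per-candidate suffix-slice loop by one rpartition-style split off
-- of the trailing token followed by a set lookup (objective: simpler).

-- ===== PORT A =====
-- the for-loop over `types` with its two early returns
def pvAGo (text : String) : List String → Option String × String
  | [] => (none, text)
  | ptype :: rest =>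
    if PySem.Str.slice text (some (-1 * PySem.Str.len ptype - 1)) none = " " ++ ptype then
      (some ptype, PySem.Str.slice text none (some (-1 * PySem.Str.len ptype - 1)))
    else if text = ptype then
      (some ptype, "")
    else pvAGo text rest

def parse_payment_type (text : String) : Option String × String :=
  pvAGo text [")))", "ATM", "BP", "CR", "DD", "SO", "TFR", "VIS", "DR"]

-- ===== PORT B =====
-- text.rpartition(" ") on the char list: some (before, after) of the LAST space, none if no space
def pvRpartSpace : List Char → Option (List Char × List Char)
  | [] => none
  | c :: cs =>
    match pvRpartSpace cs with
    | some (p, l) => some (c :: p, l)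
    | none => if c = ' ' then some ([], cs) else none

def parse_payment_type_alt (text : String) : Option String × String :=
  let types : List String := [")))", "ATM", "BP", "CR", "DD", "SO", "TFR", "VIS", "DR"]
  match pvRpartSpace text.toList with
  | some (prefix_, last) =>
    if String.ofList last ∈ types then (some (String.ofList last), String.ofList prefix_)
    else if text ∈ types then (some text, "")
    else (none, text)
  | none =>
    if text ∈ types then (some text, "")
    else (none, text)

-- ===== PRECONDITION & SPEC =====
def Spec_parse_payment_type (text : String) (out : Option String × String) : Prop := out = parse_payment_type_alt text
instance (text : String) (out : Option String × String) : Decidable (Spec_parse_payment_type text out) := by unfold Spec_parse_payment_type; infer_instance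

-- ===== CLAIM (what is proved, stated in full; the proofs are below) =====
def Claim_equal_parse_payment_type : Prop := ∀ (text : String), Dom_parse_payment_type text → Spec_parse_payment_type text (parse_payment_type text)

-- ===== LEMMAS AND PROOFS =====

lemma pvRpart_none (cs : List Char) : pvRpartSpace cs = none ↔ ' ' ∉ cs := by
  induction cs with
  | nil => simp [pvRpartSpace]
  | cons c cs ih =>
    cases h : pvRpartSpace cs with
    | some pl =>
      have hmem : ' ' ∈ cs := by
        by_contra hn
        rw [ih.mpr hn] at h
        simp at h
      simp [pvRpartSpace, h, hmem]
    | none =>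
      have hn : ' ' ∉ cs := ih.mp h
      by_cases hc : c = ' '
      · simp [pvRpartSpace, h, hc]
      · simp [pvRpartSpace, h, hc, hn, Ne.symm hc]

lemma pvRpart_some (cs p l : List Char) (h : pvRpartSpace cs = some (p, l)) :
    cs = p ++ ' ' :: l ∧ ' ' ∉ l := by
  induction cs generalizing p l with
  | nil => simp [pvRpartSpace] at h
  | cons c cs ih =>
    rw [pvRpartSpace] at h
    cases h' : pvRpartSpace cs with
    | some pl =>
      obtain ⟨p', l'⟩ := pl
      rw [h'] at h
      simp at h
      obtain ⟨hp, hl⟩ := h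
      subst hp; subst hl
      obtain ⟨hcs, hnl⟩ := ih p' l' h'
      exact ⟨by rw [hcs]; rfl, hnl⟩
    | none =>
      rw [h'] at h
      by_cases hc : c = ' '
      · subst hc
        simp at h
        obtain ⟨hp, hl⟩ := h
        subst hp; subst hl
        exact ⟨rfl, (pvRpart_none cs).mp h'⟩
      · simp [hc] at h

-- among suffixes of pref ++ ' ' :: l that look like ' ' :: w with space-free w, w must be l
lemma pvSuffix_space_unique (pref l w : List Char) (hl : ' ' ∉ l) (hw : ' ' ∉ w)
    (h : (' ' :: w) <:+ (pref ++ ' ' :: l)) : w = l := by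
  have h2 : (' ' :: l) <:+ (pref ++ ' ' :: l) := ⟨pref, rfl⟩
  rcases List.suffix_or_suffix_of_suffix h h2 with hs | hs
  · rcases (List.suffix_cons_iff.mp hs) with he | ht
    · injection he
    · exact absurd (ht.subset (by simp)) hl
  · rcases (List.suffix_cons_iff.mp hs) with he | ht
    · injection he with _ h'; exact h'.symm
    · exact absurd (ht.subset (by simp)) hw

-- A's slice test is exactly "(' ' :: ptype) is a suffix of text"
lemma pvCondA_iff (text ptype : String) :
    (PySem.Str.slice text (some (-1 * PySem.Str.len ptype - 1)) none = " " ++ ptype)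
      ↔ (' ' :: ptype.toList) <:+ text.toList := by
  have hk : (-1 * PySem.Str.len ptype - 1) = -((ptype.toList.length + 1 : Nat) : Int) := by
    rw [PySem.Str.len_eq]; push_cast; ring
  have hsp : (" " ++ ptype).toList = ' ' :: ptype.toList := by
    rw [String.toList_append]; rfl
  rw [String.ext_iff, PySem.Str.toList_slice, PySem.Chars.slice_eq_listSlice, hk,
      PySem.List.slice_from_neg_natCast _ _ (Nat.succ_pos _), hsp]
  constructor
  · intro h
    have hd := List.drop_suffix (text.toList.length - (ptype.toList.length + 1)) text.toList
    rw [h] at hd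
    exact hd
  · intro h
    obtain ⟨p, hp⟩ := h
    rw [← hp]
    simp

lemma pvAGo_nospace (text : String) (h : ' ' ∉ text.toList) (ts : List String) :
    pvAGo text ts = if text ∈ ts then (some text, "") else (none, text) := by
  induction ts with
  | nil => simp [pvAGo]
  | cons t ts ih =>
    rw [pvAGo, if_neg (fun hc => h (((pvCondA_iff text t).mp hc).subset (by simp)))]
    by_cases he : text = t
    · subst he; simp
    · rw [if_neg he, ih]; simp [he]

lemma pvAGo_space (text : String) (pref l : List Char)
    (hcs : text.toList = pref ++ ' ' :: l) (hl : ' ' ∉ l) (ts : List String)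
    (hts : ∀ t ∈ ts, ' ' ∉ t.toList) :
    pvAGo text ts =
      if String.ofList l ∈ ts then (some (String.ofList l), String.ofList pref)
      else (none, text) := by
  have hsp : ' ' ∈ text.toList := by rw [hcs]; simp
  induction ts with
  | nil => simp [pvAGo]
  | cons t ts ih =>
    by_cases ht : t.toList = l
    · have hsuf : (' ' :: t.toList) <:+ text.toList := by rw [hcs, ht]; exact ⟨pref, rfl⟩
      have htl : t = String.ofList l := by
        rw [String.ext_iff, String.toList_ofList, ht]
      have hmem : String.ofList l ∈ t :: ts := by rw [← htl]; exact List.mem_cons_self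
      have hk : (-1 * PySem.Str.len t - 1) = -((l.length + 1 : Nat) : Int) := by
        rw [PySem.Str.len_eq, ht]; push_cast; ring
      have h2 : PySem.Str.slice text none (some (-1 * PySem.Str.len t - 1)) = String.ofList pref := by
        rw [String.ext_iff, PySem.Str.toList_slice, PySem.Chars.slice_eq_listSlice, hk,
            PySem.List.slice_to_neg_natCast _ _ (Nat.succ_pos _), String.toList_ofList, hcs]
        simp
      rw [pvAGo, if_pos ((pvCondA_iff text t).mpr hsuf), if_pos hmem, h2, htl]
    · have hc1 : ¬ (PySem.Str.slice text (some (-1 * PySem.Str.len t - 1)) none = " " ++ t) := by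
        intro hc
        exact ht (pvSuffix_space_unique pref l t.toList hl
          (hts t List.mem_cons_self) (hcs ▸ (pvCondA_iff text t).mp hc))
      have hc2 : text ≠ t := fun he => hts t List.mem_cons_self (he ▸ hsp)
      have hne : String.ofList l ≠ t := by
        intro he; exact ht (by rw [← he, String.toList_ofList])
      rw [pvAGo, if_neg hc1, if_neg hc2,
          ih (fun t' ht' => hts t' (List.mem_cons_of_mem _ ht'))]
      simp [hne]

lemma pvTypes_nospace :
    ∀ t ∈ ([")))", "ATM", "BP", "CR", "DD", "SO", "TFR", "VIS", "DR"] : List String),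
      ' ' ∉ t.toList := by decide

-- ===== VERDICT (by name: the statement is the Claim_ definition above) =====
theorem parse_payment_type_spec : Claim_equal_parse_payment_type := by
  intro text _
  unfold Spec_parse_payment_type parse_payment_type parse_payment_type_alt
  cases h : pvRpartSpace text.toList with
  | none =>
    rw [pvAGo_nospace text ((pvRpart_none _).mp h)]
  | some pl =>
    obtain ⟨pref, l⟩ := pl
    obtain ⟨hcs, hl⟩ := pvRpart_some _ _ _ h
    have hsp : ' ' ∈ text.toList := by rw [hcs]; simp
    have hnotmem : text ∉ ([")))", "ATM", "BP", "CR", "DD", "SO", "TFR", "VIS", "DR"] : List String) :=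
      fun hm => pvTypes_nospace text hm hsp
    rw [pvAGo_space text pref l hcs hl _ pvTypes_nospace]
    by_cases hmem : String.ofList l ∈ ([")))", "ATM", "BP", "CR", "DD", "SO", "TFR", "VIS", "DR"] : List String)
    · simp [hmem]
    · simp [hmem, hnotmem]
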